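-- pv_equiv track=rewrite | github.com/UNPOKOCHINPO/YUGIOU_PROBABILITY | multiple_combi/base.py | want_combi_of_2cards
-- ===== SOURCE A (Python) =====
-- def want_combi_of_2cards(a_s, b_s, hands, dontwant=[]):
--
--     for a in a_s:
--         for b in b_s:
--             if a == b:  # 同じカードは引けない
--                 continue
--
--             if a in hands and b in hands:
--
--                 alldontwant = True  # いらんカード全部引いたらtrue
--                 if len(dontwant) == 0:
--                     alldontwant = False
--                 for dw in dontwant:
--                     if dw not in hands:
--                         alldontwant = False
--
--                 if not alldontwant:
--                     return True
--     return False
-- ===== SOURCE B (Python) =====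
-- def want_combi_of_2cards(a_s, b_s, hands, dontwant=[]):
--     h = set(hands)
--     if dontwant and all(dw in h for dw in dontwant):
--         return False
--     a_in = h.intersection(a_s)
--     b_in = h.intersection(b_s)
--     if not a_in or not b_in:
--         return False
--     return not (len(a_in) == 1 and a_in == b_in)
-- ===== Notes on version B (the rewrite author's own statement) =====
-- stated objective: faster
-- what changed: Replaces the nested scan over all (a,b) pairs (with the dontwant flag recomputed inside the inner loop) by one precomputed dontwant check plus set intersections of a_s and b_s with hands, deciding pair existence by a nonempty/non-identical-singleton test.
import Mathlib
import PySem

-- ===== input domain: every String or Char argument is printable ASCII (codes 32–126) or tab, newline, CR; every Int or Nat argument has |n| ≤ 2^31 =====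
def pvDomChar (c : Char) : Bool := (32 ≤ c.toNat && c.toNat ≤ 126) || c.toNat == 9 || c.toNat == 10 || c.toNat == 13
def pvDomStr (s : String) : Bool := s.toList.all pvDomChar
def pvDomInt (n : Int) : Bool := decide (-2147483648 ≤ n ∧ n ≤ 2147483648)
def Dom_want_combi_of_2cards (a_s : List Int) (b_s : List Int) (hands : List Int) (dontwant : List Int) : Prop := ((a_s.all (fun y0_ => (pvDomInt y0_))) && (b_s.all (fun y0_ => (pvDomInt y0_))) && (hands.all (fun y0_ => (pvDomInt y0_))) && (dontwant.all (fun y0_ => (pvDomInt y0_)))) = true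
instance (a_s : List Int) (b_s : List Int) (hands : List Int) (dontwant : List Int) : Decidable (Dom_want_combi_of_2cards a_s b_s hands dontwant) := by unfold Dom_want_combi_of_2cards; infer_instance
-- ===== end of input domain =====

-- B replaces A's nested pair scan (with the dontwant flag recomputed per pair) by one
-- precomputed dontwant check plus set intersections with hands; objective: faster.

-- ===== PORT A =====
-- the inner 'alldontwant' computation of A, exactly as written (init, then the dw loop)
def pvA_alldontwant (hands : List Int) (dontwant : List Int) : Bool :=
  let init := if dontwant.length == 0 then false else true
  dontwant.foldl (fun acc dw => if !(hands.contains dw) then false else acc) init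

-- inner 'for b in b_s' loop with its early return
def pvA_inner (a : Int) (bs : List Int) (hands : List Int) (dontwant : List Int) : Bool :=
  match bs with
  | [] => false
  | b :: rest =>
    if a == b then pvA_inner a rest hands dontwant
    else if hands.contains a && hands.contains b then
      if !(pvA_alldontwant hands dontwant) then true
      else pvA_inner a rest hands dontwant
    else pvA_inner a rest hands dontwant

-- outer 'for a in a_s' loop
def pvA_outer (as_ : List Int) (bs : List Int) (hands : List Int) (dontwant : List Int) : Bool :=
  match as_ with
  | [] => false
  | a :: rest =>
    if pvA_inner a bs hands dontwant then true
    else pvA_outer rest bs hands dontwant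

def want_combi_of_2cards (a_s : List Int) (b_s : List Int) (hands : List Int) (dontwant : List Int) : Bool :=
  pvA_outer a_s b_s hands dontwant

-- ===== PORT B =====
def want_combi_of_2cards_alt (a_s : List Int) (b_s : List Int) (hands : List Int) (dontwant : List Int) : Bool :=
  -- h = set(hands); a_in / b_in = h ∩ a_s / h ∩ b_s, as in Source B
  if !dontwant.isEmpty && dontwant.all (fun dw => PySem.Set.contains (PySem.Set.ofList hands) dw) then false
  else
    if (PySem.Set.inter (PySem.Set.ofList hands) a_s).isEmpty || (PySem.Set.inter (PySem.Set.ofList hands) b_s).isEmpty then false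
    else !(PySem.Set.len (PySem.Set.inter (PySem.Set.ofList hands) a_s) == 1 &&
           PySem.Set.equal (PySem.Set.inter (PySem.Set.ofList hands) a_s) (PySem.Set.inter (PySem.Set.ofList hands) b_s))

-- ===== PRECONDITION & SPEC =====
def Spec_want_combi_of_2cards (a_s : List Int) (b_s : List Int) (hands : List Int) (dontwant : List Int) (out : Bool) : Prop := out = want_combi_of_2cards_alt a_s b_s hands dontwant
instance (a_s : List Int) (b_s : List Int) (hands : List Int) (dontwant : List Int) (out : Bool) : Decidable (Spec_want_combi_of_2cards a_s b_s hands dontwant out) := by unfold Spec_want_combi_of_2cards; infer_instance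

-- ===== CLAIM (what is proved, stated in full; the proofs are below) =====
def Claim_equal_want_combi_of_2cards : Prop := ∀ (a_s : List Int) (b_s : List Int) (hands : List Int) (dontwant : List Int), Dom_want_combi_of_2cards a_s b_s hands dontwant → Spec_want_combi_of_2cards a_s b_s hands dontwant (want_combi_of_2cards a_s b_s hands dontwant)

-- ===== LEMMAS AND PROOFS =====

theorem pvA_foldl_and (hands : List Int) (dontwant : List Int) (init : Bool) :
    dontwant.foldl (fun acc dw => if !(hands.contains dw) then false else acc) init
      = (init && dontwant.all (fun dw => hands.contains dw)) := by
  induction dontwant generalizing init with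
  | nil => simp
  | cons d rest ih =>
    simp only [List.foldl_cons, List.all_cons, ih]
    by_cases h : hands.contains d <;> simp [Bool.and_assoc, Bool.and_comm]

theorem pvA_alldontwant_eq (hands : List Int) (dontwant : List Int) :
    pvA_alldontwant hands dontwant
      = (!dontwant.isEmpty && dontwant.all (fun dw => hands.contains dw)) := by
  unfold pvA_alldontwant
  rw [pvA_foldl_and]
  cases dontwant <;> simp

theorem pvA_inner_eq (a : Int) (bs : List Int) (hands : List Int) (dontwant : List Int) :
    pvA_inner a bs hands dontwant
      = (bs.any (fun b => !(a == b) && (hands.contains a && hands.contains b))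
          && !(pvA_alldontwant hands dontwant)) := by
  induction bs with
  | nil => simp [pvA_inner]
  | cons b rest ih =>
    simp only [pvA_inner, List.any_cons, ih]
    by_cases h1 : a = b
    · simp [h1]
    · by_cases ha : a ∈ hands <;> by_cases hb : b ∈ hands <;>
        by_cases h3 : pvA_alldontwant hands dontwant <;>
        simp_all

theorem pvA_outer_eq (as_ : List Int) (bs : List Int) (hands : List Int) (dontwant : List Int) :
    pvA_outer as_ bs hands dontwant
      = (as_.any (fun a => bs.any (fun b => !(a == b) && (hands.contains a && hands.contains b)))
          && !(pvA_alldontwant hands dontwant)) := by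
  induction as_ with
  | nil => simp [pvA_outer]
  | cons a rest ih =>
    simp only [pvA_outer, List.any_cons]
    rw [ih, pvA_inner_eq]
    cases hpa : bs.any (fun b => !(a == b) && (hands.contains a && hands.contains b)) <;>
      cases hk : pvA_alldontwant hands dontwant <;> simp

-- a nonempty nodup list that is not a singleton has an element different from any given b
theorem pv_exists_ne_of_two_le {l : List Int} (hn : l.Nodup) (h2 : 2 ≤ l.length) (b : Int) :
    ∃ x ∈ l, x ≠ b := by
  match l, hn, h2 with
  | x :: y :: rest, hn, _ =>
    have hxy : x ≠ y := by simp [List.nodup_cons] at hn; simp_all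
    by_cases hxb : x = b
    · exact ⟨y, by simp, by simpa [hxb] using hxy.symm⟩
    · exact ⟨x, by simp, hxb⟩

-- pair existence ↔ the intersections are nonempty and not the same singleton
theorem pv_pair_iff (a_s b_s hands : List Int) :
    (∃ a ∈ a_s, ∃ b ∈ b_s, a ≠ b ∧ a ∈ hands ∧ b ∈ hands)
      ↔ (PySem.Set.inter (PySem.Set.ofList hands) a_s ≠ [] ∧
         PySem.Set.inter (PySem.Set.ofList hands) b_s ≠ [] ∧
           ¬((PySem.Set.inter (PySem.Set.ofList hands) a_s).length = 1 ∧
             PySem.Set.equal (PySem.Set.inter (PySem.Set.ofList hands) a_s)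
               (PySem.Set.inter (PySem.Set.ofList hands) b_s) = true)) := by
  set h := PySem.Set.ofList hands with hh
  set aIn := PySem.Set.inter h a_s with ha
  set bIn := PySem.Set.inter h b_s with hb
  have memA : ∀ x, x ∈ aIn ↔ x ∈ hands ∧ x ∈ a_s := by
    intro x; rw [ha, PySem.Set.mem_inter, hh, PySem.Set.mem_ofList]
  have memB : ∀ x, x ∈ bIn ↔ x ∈ hands ∧ x ∈ b_s := by
    intro x; rw [hb, PySem.Set.mem_inter, hh, PySem.Set.mem_ofList]
  have nodupA : aIn.Nodup := PySem.Set.nodup_inter _ _ (PySem.Set.nodup_ofList _)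
  constructor
  · rintro ⟨a, haS, b, hbS, hab, haH, hbH⟩
    have haIn : a ∈ aIn := (memA a).2 ⟨haH, haS⟩
    have hbIn : b ∈ bIn := (memB b).2 ⟨hbH, hbS⟩
    refine ⟨List.ne_nil_of_mem haIn, List.ne_nil_of_mem hbIn, ?_⟩
    rintro ⟨h1, heq⟩
    obtain ⟨x, hx⟩ := List.length_eq_one_iff.1 h1
    have hax : a = x := by simpa [hx] using haIn
    have hbx : b = x := by
      have := (PySem.Set.equal_iff _ _).1 heq b
      have : b ∈ aIn := this.2 hbIn
      simpa [hx] using this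
    exact hab (hax.trans hbx.symm)
  · rintro ⟨hA, hB, hns⟩
    obtain ⟨a, haIn⟩ := List.exists_mem_of_ne_nil _ hA
    obtain ⟨b, hbIn⟩ := List.exists_mem_of_ne_nil _ hB
    obtain ⟨haH, haS⟩ := (memA a).1 haIn
    obtain ⟨hbH, hbS⟩ := (memB b).1 hbIn
    by_cases hab : a = b
    · subst hab
      by_cases hlen : aIn.length = 1
      · -- aIn = [a], and equality must fail: some element witnesses the difference
        have hne : ¬ PySem.Set.equal aIn bIn = true := fun he => hns ⟨hlen, he⟩
        rw [PySem.Set.equal_iff] at hne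
        push Not at hne
        obtain ⟨x, hx⟩ := hne
        obtain ⟨w, hw⟩ := List.length_eq_one_iff.1 hlen
        have haw : a = w := by simpa [hw] using haIn
        by_cases hxa : x ∈ aIn
        · -- x = a, so a ∉ bIn, contradicting a ∈ bIn
          have hxw : x = w := by simpa [hw] using hxa
          have : x ∉ bIn := by tauto
          exact absurd hbIn (by rwa [← haw.trans hxw.symm] at this)
        · have hxb : x ∈ bIn := by tauto
          obtain ⟨hxH, hxS⟩ := (memB x).1 hxb
          have hax : a ≠ x := fun he => hxa (he ▸ haIn)
          exact ⟨a, haS, x, hxS, hax, haH, hxH⟩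
      · -- |aIn| ≥ 2: pick an element of aIn different from b
        have hpos : 0 < aIn.length := List.length_pos_of_ne_nil hA
        have h2 : 2 ≤ aIn.length := by omega
        obtain ⟨a', ha'In, ha'b⟩ := pv_exists_ne_of_two_le nodupA h2 a
        obtain ⟨ha'H, ha'S⟩ := (memA a').1 ha'In
        exact ⟨a', ha'S, a, hbS, ha'b, ha'H, hbH⟩
    · exact ⟨a, haS, b, hbS, hab, haH, hbH⟩

theorem pvB_if_iff (A B : List Int) :
    ((if (A.isEmpty || B.isEmpty) = true then false
      else !(PySem.Set.len A == 1 && PySem.Set.equal A B)) = true)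
      ↔ (A ≠ [] ∧ B ≠ [] ∧ ¬(A.length = 1 ∧ PySem.Set.equal A B = true)) := by
  split_ifs with h
  · simp only [List.isEmpty_iff, Bool.or_eq_true] at h
    rcases h with h | h <;> simp [h]
  · simp only [Bool.or_eq_true, List.isEmpty_iff, not_or] at h
    simp only [h.1, h.2, ne_eq, not_false_eq_true, true_and, PySem.Set.len,
      Bool.not_eq_true', Bool.and_eq_false_iff]
    constructor
    · rintro (h1 | h2) ⟨hl, he⟩
      · simp [hl] at h1
      · simp [he] at h2
    · intro hn
      by_cases hl : A.length = 1
      · right; rw [Bool.eq_false_iff]; intro he; exact hn ⟨hl, he⟩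
      · left; simp [hl]

theorem pv_main (a_s b_s hands dontwant : List Int) :
    want_combi_of_2cards a_s b_s hands dontwant
      = want_combi_of_2cards_alt a_s b_s hands dontwant := by
  unfold want_combi_of_2cards want_combi_of_2cards_alt
  rw [pvA_outer_eq, pvA_alldontwant_eq]
  have hmem : ∀ dw : Int, List.contains (PySem.Set.ofList hands) dw = List.contains hands dw := by
    intro dw
    by_cases h : dw ∈ hands
    · simp [PySem.Set.mem_ofList, h]
    · simp [PySem.Set.mem_ofList, h]
  simp only [PySem.Set.contains_eq_listContains, hmem]
  by_cases hK : (!dontwant.isEmpty && dontwant.all fun dw => hands.contains dw) = true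
  · rw [if_pos hK, hK]; simp
  · rw [Bool.not_eq_true] at hK
    rw [if_neg (by rw [hK]; exact Bool.false_ne_true), hK, Bool.not_false, Bool.and_true, Bool.eq_iff_iff,
      pvB_if_iff, ← pv_pair_iff]
    simp only [List.any_eq_true, Bool.and_eq_true, Bool.not_eq_eq_eq_not, Bool.not_true,
      beq_eq_false_iff_ne, ne_eq, List.contains_iff_mem]

-- ===== VERDICT (by name: the statement is the Claim_ definition above) =====
theorem want_combi_of_2cards_spec : Claim_equal_want_combi_of_2cards := by
  intro a_s b_s hands dontwant _
  unfold Spec_want_combi_of_2cards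
  exact pv_main a_s b_s hands dontwant
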